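-- pv_equiv track=rewrite | github.com/uldissturms/mit-600 | 600/sixth.py | substract
-- ===== SOURCE A (Python) =====
-- def substract(dict, list):
--     new_dict = dict.copy()
--     for item in list:
--         if item in new_dict:
--             new_dict[item] -= 1
--         else:
--             new_dict[item] = -1
--     return new_dict
-- ===== SOURCE B (Python) =====
-- def substract(dict, list):
--     counts = {}
--     for item in list:
--         counts[item] = counts.get(item, 0) + 1
--     new_dict = dict.copy()
--     for item, c in counts.items():
--         new_dict[item] = new_dict.get(item, 0) - c
--     return new_dict
-- ===== Notes on version B (the rewrite author's own statement) =====
-- stated objective: alternative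
-- what changed: B first builds a frequency table of the list in one counting pass, then subtracts each aggregated count from a copy of the dict in a single pass over the distinct keys, instead of A's per-occurrence membership-test-and-decrement loop.
import Mathlib
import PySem

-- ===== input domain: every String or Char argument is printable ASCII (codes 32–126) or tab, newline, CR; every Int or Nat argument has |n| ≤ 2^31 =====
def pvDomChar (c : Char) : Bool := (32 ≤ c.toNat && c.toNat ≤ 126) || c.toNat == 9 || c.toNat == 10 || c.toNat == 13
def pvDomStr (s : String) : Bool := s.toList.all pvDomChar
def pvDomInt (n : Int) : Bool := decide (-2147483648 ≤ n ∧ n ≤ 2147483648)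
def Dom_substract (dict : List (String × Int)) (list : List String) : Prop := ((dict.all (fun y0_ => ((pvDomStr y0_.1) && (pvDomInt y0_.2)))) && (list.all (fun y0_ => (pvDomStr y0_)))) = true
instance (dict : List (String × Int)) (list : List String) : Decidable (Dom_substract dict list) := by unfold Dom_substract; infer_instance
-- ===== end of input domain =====

-- B builds a frequency table of the list first and then subtracts each aggregated
-- count from a copy of the dict in one pass over distinct keys (objective: alternative).

-- ===== PORT A =====
-- loop body of A: 'if item in new_dict: new_dict[item] -= 1 else: new_dict[item] = -1'
def substractStep (nd : PySem.Dict String Int) (item : String) : PySem.Dict String Int :=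
  if nd.contains item then nd.insert item (nd.getD item 0 - 1) else nd.insert item (-1)

def substract (dict : List (String × Int)) (list : List String) : List (String × Int) :=
  (list.foldl substractStep (PySem.Dict.mk dict)).items

-- ===== PORT B =====
-- loop body of B's counting pass: 'counts[item] = counts.get(item, 0) + 1'
def countStep (c : PySem.Dict String Int) (item : String) : PySem.Dict String Int :=
  c.insert item (c.getD item 0 + 1)

-- loop body of B's subtracting pass: 'new_dict[item] = new_dict.get(item, 0) - c'
def subStep (nd : PySem.Dict String Int) (p : String × Int) : PySem.Dict String Int :=
  nd.insert p.1 (nd.getD p.1 0 - p.2)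

def substract_alt (dict : List (String × Int)) (list : List String) : List (String × Int) :=
  let counts := list.foldl countStep PySem.Dict.empty
  (counts.items.foldl subStep (PySem.Dict.mk dict)).items

-- ===== PRECONDITION & SPEC =====
def Spec_substract (dict : List (String × Int)) (list : List String) (out : List (String × Int)) : Prop := out = substract_alt dict list
instance (dict : List (String × Int)) (list : List String) (out : List (String × Int)) : Decidable (Spec_substract dict list out) := by unfold Spec_substract; infer_instance

-- ===== CLAIM (what is proved, stated in full; the proofs are below) =====
def Claim_equal_substract : Prop := ∀ (dict : List (String × Int)) (list : List String), Dom_substract dict list → Spec_substract dict list (substract dict list)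

-- ===== LEMMAS AND PROOFS =====

-- A's branchy step is the uniform 'insert (old value - 1)' step on a singleton count.
theorem substractStep_eq_subStep (nd : PySem.Dict String Int) (x : String) :
    substractStep nd x = subStep nd (x, 1) := by
  unfold substractStep subStep
  cases hx : nd.contains x with
  | true => simp
  | false =>
    rw [if_neg (by simp), PySem.Dict.getD_of_not_contains nd 0 hx]
    norm_num

-- two inserts at distinct keys commute when the first key is already present
theorem insert_comm_of_contains (nd : PySem.Dict String Int) (x k : String) (w V : Int)
    (hx : nd.contains x = true) (hne : k ≠ x) :
    (nd.insert x w).insert k V = (nd.insert k V).insert x w := by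
  apply PySem.Dict.ext
  have hxk : (nd.insert k V).contains x = true := by
    rw [PySem.Dict.contains_insert]
    simp [hx]
  by_cases hk : nd.contains k = true
  · have h1 : (nd.insert x w).contains k = true := by
      rw [PySem.Dict.contains_insert]
      simp [hk]
    rw [PySem.Dict.items_insert_of_contains _ _ h1, PySem.Dict.items_insert_of_contains _ _ hx,
        PySem.Dict.items_insert_of_contains _ _ hxk, PySem.Dict.items_insert_of_contains _ _ hk,
        List.map_map, List.map_map]
    apply List.map_congr_left
    intro p _
    by_cases hpx : p.1 = x <;> by_cases hpk : p.1 = k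
    · exact absurd (hpk ▸ hpx) hne
    · simp [hpx, Ne.symm hne]
    · simp [hpk, hne]
    · simp [hpx, hpk]
  · simp only [Bool.not_eq_true] at hk
    have h1 : (nd.insert x w).contains k = false := by
      rw [PySem.Dict.contains_insert]
      simp [hk, hne]
    rw [PySem.Dict.items_insert_of_not_contains _ _ h1, PySem.Dict.items_insert_of_contains _ _ hx,
        PySem.Dict.items_insert_of_contains _ _ hxk, PySem.Dict.items_insert_of_not_contains _ _ hk,
        List.map_append]
    simp [hne]

-- a subtract pass over pairs whose keys avoid x does not change the value at x
theorem getD_subFold_of_not_mem (ps : List (String × Int)) (nd : PySem.Dict String Int)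
    (x : String) (h : ∀ p ∈ ps, p.1 ≠ x) :
    (ps.foldl subStep nd).getD x 0 = nd.getD x 0 := by
  induction ps generalizing nd with
  | nil => rfl
  | cons p ps ih =>
    simp only [List.foldl_cons]
    rw [ih _ (fun q hq => h q (List.mem_cons_of_mem _ hq))]
    exact PySem.Dict.getD_insert_of_ne nd _ _ (Ne.symm (h p (List.mem_cons_self)))

-- an insert at a present key commutes over a subtract pass avoiding that key
theorem subFold_insert_of_contains (ps : List (String × Int)) (nd : PySem.Dict String Int)
    (x : String) (w : Int) (hx : nd.contains x = true) (h : ∀ p ∈ ps, p.1 ≠ x) :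
    ps.foldl subStep (nd.insert x w) = (ps.foldl subStep nd).insert x w := by
  induction ps generalizing nd with
  | nil => rfl
  | cons p ps ih =>
    have hpx : p.1 ≠ x := h p (List.mem_cons_self)
    simp only [List.foldl_cons, subStep]
    rw [PySem.Dict.getD_insert_of_ne nd w 0 hpx,
        insert_comm_of_contains nd x p.1 w _ hx hpx]
    exact ih (nd.insert p.1 _)
      (by rw [PySem.Dict.contains_insert]; simp [hx])
      (fun q hq => h q (List.mem_cons_of_mem _ hq))

-- one counting step on the counts dict = one extra decrement after the subtract pass
theorem subFold_countStep (c : PySem.Dict String Int) (hc : c.keys.Nodup)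
    (d : PySem.Dict String Int) (x : String) :
    (countStep c x).items.foldl subStep d = subStep (c.items.foldl subStep d) (x, 1) := by
  unfold countStep
  by_cases hx : c.contains x = true
  · have hmem : x ∈ c.keys := (PySem.Dict.contains_iff_mem_keys c x).mp hx
    simp only [PySem.Dict.keys, List.mem_map] at hmem
    obtain ⟨⟨p1, v⟩, hmem2, hfst⟩ := hmem
    simp only at hfst
    subst hfst
    have hp : (p1, v) ∈ c.items := hmem2
    obtain ⟨s, t, hst⟩ := List.append_of_mem hp
    have hv : c.getD p1 0 = v := PySem.Dict.getD_of_mem_items c hp hc 0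
    have hkeys : ((s ++ (p1, v) :: t).map Prod.fst).Nodup := by
      rw [← hst]
      simpa [PySem.Dict.keys] using hc
    simp only [List.map_append, List.map_cons, List.nodup_append, List.nodup_cons] at hkeys
    have hs : ∀ q ∈ s, q.1 ≠ p1 := fun q hq he =>
      hkeys.2.2 q.1 (List.mem_map_of_mem hq) p1 (List.mem_cons_self) he
    have ht : ∀ q ∈ t, q.1 ≠ p1 := fun q hq he =>
      hkeys.2.1.1 (he ▸ List.mem_map_of_mem hq)
    have hitems : (c.insert p1 (c.getD p1 0 + 1)).items = s ++ (p1, v + 1) :: t := by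
      rw [PySem.Dict.items_insert_of_contains _ _ hx, hst, hv, List.map_append, List.map_cons]
      have e1 : s.map (fun p => if (p.1 == p1) = true then (p1, v + 1) else p) = s := by
        rw [List.map_congr_left (g := id) (fun q hq => by simp [hs q hq]), List.map_id]
      have e2 : t.map (fun p => if (p.1 == p1) = true then (p1, v + 1) else p) = t := by
        rw [List.map_congr_left (g := id) (fun q hq => by simp [ht q hq]), List.map_id]
      rw [e1, e2]
      simp
    have hsub : ∀ (nd : PySem.Dict String Int) (b : Int),
        subStep nd (p1, b) = nd.insert p1 (nd.getD p1 0 - b) := fun _ _ => rfl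
    rw [hitems, hst, List.foldl_append, List.foldl_append, List.foldl_cons, List.foldl_cons,
        hsub, hsub, hsub]
    have hM : (t.foldl subStep ((s.foldl subStep d).insert p1 ((s.foldl subStep d).getD p1 0 - v))).getD p1 0
        = (s.foldl subStep d).getD p1 0 - v := by
      rw [getD_subFold_of_not_mem t _ p1 ht, PySem.Dict.getD_insert_self]
    rw [hM]
    have hcomm := subFold_insert_of_contains t
      ((s.foldl subStep d).insert p1 ((s.foldl subStep d).getD p1 0 - v)) p1
      ((s.foldl subStep d).getD p1 0 - v - 1)
      (PySem.Dict.contains_insert_self _ _ _) ht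
    rw [PySem.Dict.insert_insert_self] at hcomm
    rw [← hcomm]
    have harith : (s.foldl subStep d).getD p1 0 - (v + 1)
        = (s.foldl subStep d).getD p1 0 - v - 1 := by ring
    rw [harith]
  · simp only [Bool.not_eq_true] at hx
    rw [PySem.Dict.getD_of_not_contains c 0 hx,
        PySem.Dict.items_insert_of_not_contains c _ hx, List.foldl_append]
    norm_num

-- main invariant: subtracting the running counts equals A's per-occurrence loop
theorem key_lemma (l : List String) (c0 : PySem.Dict String Int) (hc : c0.keys.Nodup)
    (d : PySem.Dict String Int) :
    (l.foldl countStep c0).items.foldl subStep d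
      = l.foldl substractStep (c0.items.foldl subStep d) := by
  induction l generalizing c0 with
  | nil => rfl
  | cons x l ih =>
    simp only [List.foldl_cons]
    rw [ih (countStep c0 x) (by unfold countStep; exact PySem.Dict.nodup_keys_insert c0 x _ hc),
        subFold_countStep c0 hc d x, substractStep_eq_subStep]

-- ===== VERDICT (by name: the statement is the Claim_ definition above) =====
theorem substract_spec : Claim_equal_substract := by
  intro dict list _
  unfold Spec_substract substract substract_alt
  show (list.foldl substractStep (PySem.Dict.mk dict)).items
    = ((list.foldl countStep PySem.Dict.empty).items.foldl subStep (PySem.Dict.mk dict)).items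
  rw [key_lemma list PySem.Dict.empty (by simp [PySem.Dict.keys_empty]) (PySem.Dict.mk dict)]
  rfl
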